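-- pv_equiv track=rewrite | github.com/geniee44/programmers | Week2/[Lv.2] 광물 캐기.py | solution
-- ===== SOURCE A (Python) =====
-- def solution(picks, minerals):
--     answer = 0
--     standard = ["diamond", "iron", "stone"]
--
--     for i in range(len(picks)):
--         n = 0
--         for j in range(picks[i] * 5):
--             if j >= len(minerals):
--                 break
--             s = 0
--             if i - standard.index(minerals[j]) > 0:
--                 s = i - standard.index(minerals[j])
--             answer += (5 ** s)
--             n += 1
--         minerals = minerals[n:]
--
--     return answer
-- ===== SOURCE B (Python) =====
-- def solution(picks, minerals):
--     standard = {"diamond": 0, "iron": 1, "stone": 2}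
--     bounds = []
--     acc = 0
--     for p in picks:
--         acc += max(p, 0) * 5
--         bounds.append(acc)
--     total = min(len(minerals), acc)
--     answer = 0
--     i = 0
--     for pos in range(total):
--         while i < len(bounds) and bounds[i] <= pos:
--             i += 1
--         d = i - standard[minerals[pos]]
--         answer += 5 ** d if d > 0 else 1
--     return answer
-- ===== Notes on version B (the rewrite author's own statement) =====
-- stated objective: faster
-- what changed: A's pick-outer/mineral-inner nested loops, which re-slice (copy) the remaining mineral list after every pick, are replaced by precomputed cumulative pick boundaries and one position-indexed pass over the consumed prefix with a monotone bucket pointer (no slicing, no nested consumption loop).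
import Mathlib
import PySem

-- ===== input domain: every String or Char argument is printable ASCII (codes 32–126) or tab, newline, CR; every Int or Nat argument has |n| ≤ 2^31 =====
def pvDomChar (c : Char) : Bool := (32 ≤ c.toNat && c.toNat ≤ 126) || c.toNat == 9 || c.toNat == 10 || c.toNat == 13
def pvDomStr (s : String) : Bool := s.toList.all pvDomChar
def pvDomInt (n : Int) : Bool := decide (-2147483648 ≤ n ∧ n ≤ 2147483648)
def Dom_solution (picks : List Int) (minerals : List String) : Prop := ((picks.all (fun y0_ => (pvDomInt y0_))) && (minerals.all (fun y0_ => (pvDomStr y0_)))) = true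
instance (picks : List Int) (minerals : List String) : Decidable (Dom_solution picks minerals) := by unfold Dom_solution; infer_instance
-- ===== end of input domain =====

-- B replaces A's pick-outer/mineral-inner nested loops with slicing by cumulative pick
-- boundaries and a single position pass with a bucket pointer, avoiding A's per-pick list slicing (objective: faster, measured).
-- ===== PORT A =====
-- standard.index(m); A raises ValueError off-vocabulary (excluded by Pre_), port defaults there
def pvIdxA (m : String) : Int :=
  (((PySem.List.index? ["diamond", "iron", "stone"] m).getD 0 : Nat) : Int)

-- inner 'for j in range(picks[i]*5)' loop (range is lazy: recursion counts j up to the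
-- bound m = picks[i]*5): returns (answer increment, n); break at j >= len(minerals)
def innerA (i : Int) (mins : List String) (m : Int) (j : Int) : Int × Int :=
  if hj : j < m then
    if (mins.length : Int) ≤ j then (0, 0)
    else
      let idx := pvIdxA (PySem.List.pyGetD mins j "")
      let s : Int := if 0 < i - idx then i - idx else 0
      let rest := innerA i mins m (j + 1)
      (5 ^ s.toNat + rest.1, rest.2 + 1)
  else (0, 0)
termination_by (m - j).toNat
decreasing_by omega

-- outer 'for i in range(len(picks))' loop, state (answer, minerals)
def loopA : Int → Int → List String → List Int → Int
  | _, answer, _, [] => answer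
  | i, answer, mins, p :: ps =>
    let r := innerA i mins (p * 5) 0
    loopA (i + 1) (answer + r.1) (PySem.List.slice mins (some r.2) none) ps

def solution (picks : List Int) (minerals : List String) : Int :=
  loopA 0 0 minerals picks

-- ===== PORT B =====
-- standard = {"diamond": 0, "iron": 1, "stone": 2}; B raises KeyError off-vocabulary
-- (excluded by Pre_), port defaults there
def pvStdB : List (String × Int) := [("diamond", 0), ("iron", 1), ("stone", 2)]

def pvLookupB (m : String) : Int :=
  (((pvStdB.find? (fun kv => kv.1 == m)).map Prod.snd).getD 0)

-- 'for p in picks: acc += max(p,0)*5; bounds.append(acc)'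
def pvBoundsB (picks : List Int) : Int × List Int :=
  picks.foldl (fun st p => (st.1 + max p 0 * 5, st.2 ++ [st.1 + max p 0 * 5])) (0, [])

-- 'while i < len(bounds) and bounds[i] <= pos: i += 1'
def advanceB (bounds : List Int) (pos : Int) (i : Nat) : Nat :=
  if h : i < bounds.length then
    if bounds.getD i 0 ≤ pos then advanceB bounds pos (i + 1) else i
  else i
termination_by bounds.length - i
decreasing_by omega

-- 'for pos in range(total)' with pointer i and accumulator
def loopB (bounds : List Int) (mins : List String) : List Int → Nat → Int → Int
  | [], _, ans => ans
  | pos :: rest, i, ans =>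
    let i' := advanceB bounds pos i
    let d : Int := (i' : Int) - pvLookupB (PySem.List.pyGetD mins pos "")
    loopB bounds mins rest i' (ans + if 0 < d then 5 ^ d.toNat else 1)

def solution_alt (picks : List Int) (minerals : List String) : Int :=
  let b := pvBoundsB picks
  let total : Int := min (minerals.length : Int) b.1
  loopB b.2 minerals (PySem.List.pyRange 0 total 1) 0 0

-- ===== PRECONDITION & SPEC =====
-- Pre_ excludes exactly the inputs where a mineral inside the consumed prefix (the first
-- sum-of-5*positive-picks positions) is off-vocabulary: there Python A raises ValueError
-- (standard.index) and Python B raises KeyError.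
def Pre_solution (picks : List Int) (minerals : List String) : Prop :=
  ∀ m ∈ minerals.take ((picks.map (fun p => (p * 5).toNat)).sum),
    m ∈ (["diamond", "iron", "stone"] : List String)

instance (picks : List Int) (minerals : List String) : Decidable (Pre_solution picks minerals) := by
  unfold Pre_solution; infer_instance

def pvWitness_solution : List Int × List String := ([1, 2], ["diamond", "stone", "iron"])

def Spec_solution (picks : List Int) (minerals : List String) (out : Int) : Prop := out = solution_alt picks minerals
instance (picks : List Int) (minerals : List String) (out : Int) : Decidable (Spec_solution picks minerals out) := by unfold Spec_solution; infer_instance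

-- ===== CLAIM (what is proved, stated in full; the proofs are below) =====
def Claim_equal_solution : Prop := ∀ (picks : List Int) (minerals : List String), Dom_solution picks minerals → Pre_solution picks minerals → Spec_solution picks minerals (solution picks minerals)

-- ===== LEMMAS AND PROOFS =====

-- cost of mining one mineral with pick type i
def costC (i : Int) (m : String) : Int :=
  if 0 < i - pvIdxA m then 5 ^ (i - pvIdxA m).toNat else 1

-- common reference: process picks in order, each consuming min(5*pick, remaining) minerals
def specR : Int → List Int → List String → Int
  | _, [], _ => 0
  | i, p :: ps, mins =>
    let n := min (p * 5).toNat mins.length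
    ((mins.take n).map (costC i)).sum + specR (i + 1) ps (mins.drop n)

def sum5 : List Int → Int
  | [] => 0
  | p :: ps => max p 0 * 5 + sum5 ps

def cum (c : Int) : List Int → List Int
  | [] => []
  | p :: ps => (c + max p 0 * 5) :: cum (c + max p 0 * 5) ps

lemma sum5_nonneg (ps : List Int) : 0 ≤ sum5 ps := by
  induction ps with
  | nil => simp [sum5]
  | cons p ps ih => simp only [sum5]; positivity

lemma idx_eq (m : String) : pvLookupB m = pvIdxA m := by
  by_cases h1 : m = "diamond"
  · subst h1; decide
  · by_cases h2 : m = "iron"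
    · subst h2; decide
    · by_cases h3 : m = "stone"
      · subst h3; decide
      · have e1 : ("diamond" == m) = false := by simp [Ne.symm h1]
        have e2 : ("iron" == m) = false := by simp [Ne.symm h2]
        have e3 : ("stone" == m) = false := by simp [Ne.symm h3]
        simp [pvLookupB, pvStdB, pvIdxA, List.find?, PySem.List.index?_eq_idxOf?,
          List.idxOf?, List.findIdx?, List.findIdx?.go, e1, e2, e3]

lemma innerA_unfold (i : Int) (mins : List String) (m j : Int) :
    innerA i mins m j = if j < m then
      (if (mins.length : Int) ≤ j then (0, 0)
       else
         let idx := pvIdxA (PySem.List.pyGetD mins j "")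
         let s : Int := if 0 < i - idx then i - idx else 0
         let rest := innerA i mins m (j + 1)
         (5 ^ s.toNat + rest.1, rest.2 + 1))
      else (0, 0) := by
  conv_lhs => rw [innerA]
  split_ifs <;> rfl

lemma innerA_eq (i : Int) (mins : List String) :
    ∀ (n : Nat) (m : Int) (k : Nat), (m - k).toNat ≤ n →
    innerA i mins m (k : Int) =
      ((((mins.drop k).take ((min m (mins.length : Int)).toNat - k)).map (costC i)).sum,
        (((min m (mins.length : Int)).toNat - k : Nat) : Int)) := by
  intro n
  induction n with
  | zero =>
    intro m k h
    have hmk : m ≤ (k : Int) := by omega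
    rw [innerA_unfold, if_neg (by omega)]
    have he : (min m (mins.length : Int)).toNat - k = 0 := by omega
    simp [he]
  | succ n ih =>
    intro m k h
    by_cases hk : (k : Int) < m
    · rw [innerA_unfold, if_pos hk]
      have hk1 : ((k : Int) + 1) = ((k + 1 : Nat) : Int) := by push_cast; ring
      by_cases hlen : (mins.length : Int) ≤ (k : Int)
      · have he : (min m (mins.length : Int)).toNat - k = 0 := by omega
        simp [hlen, he]
      · have hklen : k < mins.length := by omega
        have hrest := ih m (k + 1) (by omega)
        have he : (min m (mins.length : Int)).toNat - k
            = ((min m (mins.length : Int)).toNat - (k + 1)) + 1 := by omega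
        have hdrop : mins.drop k = mins[k] :: mins.drop (k + 1) :=
          (List.drop_eq_getElem_cons hklen).symm ▸ rfl
        have hget : PySem.List.pyGetD mins (k : Int) "" = mins[k] := by
          rw [PySem.List.pyGetD_natCast, List.getD_eq_getElem mins "" hklen]
        rw [if_neg hlen]
        simp only [hk1, hrest, hget]
        rw [Prod.mk.injEq]
        constructor
        · rw [he, hdrop, List.take_succ_cons, List.map_cons, List.sum_cons]
          unfold costC
          split_ifs with hc
          · rfl
          · norm_num
        · rw [he]; push_cast; ring
    · rw [innerA_unfold, if_neg (by omega)]
      have he : (min m (mins.length : Int)).toNat - k = 0 := by omega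
      simp [he]

lemma loopA_eq : ∀ (picks : List Int) (i ans : Int) (mins : List String),
    loopA i ans mins picks = ans + specR i picks mins := by
  intro picks
  induction picks with
  | nil => intro i ans mins; simp [loopA, specR]
  | cons p ps ih =>
    intro i ans mins
    have hinner := innerA_eq i mins (p * 5 - 0).toNat (p * 5) 0 (le_refl _)
    rw [show ((0 : Nat) : Int) = (0 : Int) from rfl] at hinner
    have he : (min (p * 5) (mins.length : Int)).toNat - 0 = min (p * 5).toNat mins.length := by
      omega
    rw [he] at hinner
    show loopA (i + 1) (ans + _) _ ps = _
    rw [hinner]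
    simp only [List.drop_zero]
    rw [PySem.List.slice_from_natCast]
    rw [ih]
    simp only [specR]
    ring

lemma A_eq_spec (picks : List Int) (minerals : List String) :
    solution picks minerals = specR 0 picks minerals := by
  simpa [solution] using loopA_eq picks 0 0 minerals

lemma advanceB_eq (bounds : List Int) (pos : Int) (i : Nat) :
    advanceB bounds pos i = if i < bounds.length then
      (if bounds.getD i 0 ≤ pos then advanceB bounds pos (i + 1) else i) else i := by
  conv_lhs => rw [advanceB]
  split_ifs <;> rfl

lemma advanceB_cons : ∀ (n i : Nat) (b : Int) (bs : List Int) (pos : Int), bs.length - i ≤ n →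
    advanceB (b :: bs) pos (i + 1) = advanceB bs pos i + 1 := by
  intro n
  induction n with
  | zero =>
    intro i b bs pos h
    rw [advanceB_eq (b :: bs) pos (i + 1), advanceB_eq bs pos i]
    rw [if_neg (by simp; omega), if_neg (by omega)]
  | succ n ih =>
    intro i b bs pos h
    rw [advanceB_eq (b :: bs) pos (i + 1), advanceB_eq bs pos i]
    by_cases hi : i < bs.length
    · rw [if_pos (by simpa using Nat.succ_lt_succ hi), if_pos hi]
      simp only [List.getD_cons_succ]
      split_ifs with hle
      · exact ih (i + 1) b bs pos (by omega)
      · rfl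
    · rw [if_neg (by simp; omega), if_neg hi]

lemma advanceB_map_add : ∀ (n i : Nat) (bs : List Int) (c pos : Int), bs.length - i ≤ n →
    advanceB (bs.map (· + c)) pos i = advanceB bs (pos - c) i := by
  intro n
  induction n with
  | zero =>
    intro i bs c pos h
    rw [advanceB_eq (bs.map (· + c)) pos i, advanceB_eq bs (pos - c) i]
    rw [if_neg (by simp; omega), if_neg (by omega)]
  | succ n ih =>
    intro i bs c pos h
    rw [advanceB_eq (bs.map (· + c)) pos i, advanceB_eq bs (pos - c) i]
    by_cases hi : i < bs.length
    · rw [if_pos (by simpa using hi), if_pos hi]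
      have hg : (bs.map (· + c)).getD i 0 = bs.getD i 0 + c := by
        rw [List.getD_eq_getElem _ _ (by simpa using hi), List.getElem_map,
          List.getD_eq_getElem _ _ hi]
      rw [hg]
      split_ifs with h1 h2 h3
      · exact ih (i + 1) bs c pos (by omega)
      · omega
      · omega
      · rfl
    · rw [if_neg (by simpa using hi), if_neg hi]

lemma advanceB_prefix : ∀ (n i : Nat) (bounds : List Int) (pos : Int), bounds.length - i ≤ n →
    ∀ k, i ≤ k → k < advanceB bounds pos i → k < bounds.length ∧ bounds.getD k 0 ≤ pos := by
  intro n
  induction n with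
  | zero =>
    intro i bounds pos h k hik hk
    rw [advanceB_eq, if_neg (by omega)] at hk
    omega
  | succ n ih =>
    intro i bounds pos h k hik hk
    rw [advanceB_eq] at hk
    by_cases hi : i < bounds.length
    · rw [if_pos hi] at hk
      by_cases hle : bounds.getD i 0 ≤ pos
      · rw [if_pos hle] at hk
        rcases Nat.eq_or_lt_of_le hik with rfl | hik'
        · exact ⟨hi, hle⟩
        · exact ih (i + 1) bounds pos (by omega) k (by omega) hk
      · rw [if_neg hle] at hk; omega
    · rw [if_neg hi] at hk; omega

lemma advanceB_skip : ∀ (i : Nat) (bounds : List Int) (pos : Int),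
    (∀ k, k < i → k < bounds.length ∧ bounds.getD k 0 ≤ pos) →
    advanceB bounds pos 0 = advanceB bounds pos i := by
  intro i
  induction i with
  | zero => intro bounds pos _; rfl
  | succ i ih =>
    intro bounds pos H
    rw [ih bounds pos (fun k hk => H k (by omega))]
    obtain ⟨hi, hle⟩ := H i (by omega)
    rw [advanceB_eq bounds pos i, if_pos hi, if_pos hle]

def costB (mins : List String) (j : Nat) (pos : Int) : Int :=
  if 0 < (j : Int) - pvLookupB (PySem.List.pyGetD mins pos "") then
    5 ^ ((j : Int) - pvLookupB (PySem.List.pyGetD mins pos "")).toNat else 1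

lemma loopB_eq (bounds : List Int) (mins : List String) :
    ∀ (n : Nat) (a b : Int) (i : Nat) (ans : Int), (b - a).toNat ≤ n →
    (∀ k, k < i → k < bounds.length ∧ bounds.getD k 0 ≤ a) →
    loopB bounds mins (PySem.List.pyRange a b 1) i ans
      = ans + ((PySem.List.pyRange a b 1).map
          (fun pos => costB mins (advanceB bounds pos 0) pos)).sum := by
  intro n
  induction n with
  | zero =>
    intro a b i ans h H
    rw [PySem.List.pyRange_one_eq_nil (by omega)]
    simp [loopB]
  | succ n ih =>
    intro a b i ans h H
    by_cases hab : a < b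
    · rw [PySem.List.pyRange_one_cons hab]
      simp only [loopB]
      have hadv : advanceB bounds a i = advanceB bounds a 0 := (advanceB_skip i bounds a H).symm
      have H' : ∀ k, k < advanceB bounds a i → k < bounds.length ∧ bounds.getD k 0 ≤ a + 1 := by
        intro k hk
        by_cases hki : k < i
        · obtain ⟨h1, h2⟩ := H k hki; exact ⟨h1, by omega⟩
        · obtain ⟨h1, h2⟩ := advanceB_prefix bounds.length i bounds a (by omega) k
            (by omega) hk
          exact ⟨h1, by omega⟩
      rw [ih (a + 1) b (advanceB bounds a i) _ (by omega) H']
      rw [List.map_cons, List.sum_cons, hadv]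
      simp only [costB]
      ring
    · rw [PySem.List.pyRange_one_eq_nil (by omega)]
      simp [loopB]

lemma bounds_spec : ∀ (ps : List Int) (c : Int) (pre : List Int),
    ps.foldl (fun st p => (st.1 + max p 0 * 5, st.2 ++ [st.1 + max p 0 * 5])) (c, pre)
      = (c + sum5 ps, pre ++ cum c ps) := by
  intro ps
  induction ps with
  | nil => intro c pre; simp [sum5, cum]
  | cons p ps ih =>
    intro c pre
    rw [List.foldl_cons, ih]
    simp only [sum5, cum]
    rw [Prod.mk.injEq]
    constructor
    · ring
    · simp

lemma cum_shift : ∀ (ps : List Int) (c : Int), cum c ps = (cum 0 ps).map (· + c) := by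
  intro ps
  induction ps with
  | nil => intro c; simp [cum]
  | cons p ps ih =>
    intro c
    simp only [cum, List.map_cons, zero_add]
    rw [ih (c + max p 0 * 5), ih (max p 0 * 5), List.map_map]
    rw [List.cons.injEq]
    refine ⟨by ring, ?_⟩
    apply List.map_congr_left; intro x _; simp; ring

lemma specR_nil : ∀ (ps : List Int) (i : Int), specR i ps [] = 0 := by
  intro ps
  induction ps with
  | nil => intro i; rfl
  | cons p ps ih => intro i; simp [specR, ih]

lemma specR_sum5_zero : ∀ (ps : List Int) (i : Int) (mins : List String),
    sum5 ps = 0 → specR i ps mins = 0 := by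
  intro ps
  induction ps with
  | nil => intro i mins _; rfl
  | cons p ps ih =>
    intro i mins h
    have h5 : 0 ≤ sum5 ps := sum5_nonneg ps
    have hp : max p 0 * 5 = 0 := by simp only [sum5] at h; omega
    have hn : min (p * 5).toNat mins.length = 0 := by omega
    simp [specR, hn, ih _ _ (by simp only [sum5] at h; omega)]

lemma takeSum (g : String → Int) : ∀ (n : Nat) (xs : List String), n ≤ xs.length →
    ((PySem.List.pyRange 0 (n : Int) 1).map (fun pos => g (PySem.List.pyGetD xs pos ""))).sum
      = ((xs.take n).map g).sum := by
  intro n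
  induction n with
  | zero => intro xs _; simp
  | succ n ih =>
    intro xs h
    have hc : ((n + 1 : Nat) : Int) = (n : Int) + 1 := by push_cast; ring
    rw [hc, PySem.List.pyRange_one_succ_right (by omega)]
    rw [List.map_append, List.sum_append, ih xs (by omega)]
    have hn : n < xs.length := by omega
    rw [List.take_add_one, List.getElem?_eq_getElem hn]
    simp only [List.map_append, List.sum_append, Option.toList_some, List.map_cons,
      List.map_nil, List.sum_cons, List.sum_nil]
    rw [PySem.List.pyGetD_natCast, List.getD_eq_getElem xs "" hn]

lemma pyGetD_drop (xs : List String) (c : Nat) (q : Int) (hq : 0 ≤ q) :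
    PySem.List.pyGetD xs (q + (c : Int)) "" = PySem.List.pyGetD (xs.drop c) q "" := by
  obtain ⟨qn, rfl⟩ := Int.eq_ofNat_of_zero_le hq
  have hcast : (qn : Int) + (c : Int) = ((qn + c : Nat) : Int) := by push_cast; ring
  rw [hcast, PySem.List.pyGetD_natCast, PySem.List.pyGetD_natCast]
  simp [List.getD_eq_getElem?_getD, List.getElem?_drop, Nat.add_comm]

lemma pyRange_one_shift (a b : Int) :
    PySem.List.pyRange a b 1 = (PySem.List.pyRange 0 (b - a) 1).map (· + a) := by
  rw [PySem.List.pyRange_one a b, PySem.List.pyRange_one 0 (b - a)]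
  rw [List.map_map]
  simp only [sub_zero]
  apply List.map_congr_left
  intro k _
  simp only [Function.comp_apply]
  omega

lemma sumB : ∀ (picks : List Int) (mins : List String) (iBase : Int),
    ((PySem.List.pyRange 0 (min (mins.length : Int) (sum5 picks)) 1).map
      (fun pos => costC (iBase + (advanceB (cum 0 picks) pos 0 : Int))
        (PySem.List.pyGetD mins pos ""))).sum
      = specR iBase picks mins := by
  intro picks
  induction picks with
  | nil =>
    intro mins iBase
    have h0 : min ((mins.length : Int)) (sum5 []) = 0 := by
      have h00 : (0:Int) ≤ (mins.length : Int) := by positivity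
      simp only [sum5]
      omega
    rw [h0, PySem.List.pyRange_one_eq_nil (by omega)]
    rfl
  | cons p ps ih =>
    intro mins iBase
    have hc0n : (0:Int) ≤ max p 0 * 5 := by positivity
    have hs : 0 ≤ sum5 ps := sum5_nonneg ps
    have hL0 : (0:Int) ≤ (mins.length : Int) := by positivity
    have hsum : sum5 (p :: ps) = max p 0 * 5 + sum5 ps := rfl
    have hpc : (p * 5).toNat = (max p 0 * 5).toNat := by
      rcases le_total p 0 with hp | hp
      · rw [max_eq_right hp]; omega
      · rw [max_eq_left hp]
    have hcum : cum 0 (p :: ps) = (max p 0 * 5) :: (cum 0 ps).map (· + max p 0 * 5) := by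
      simp only [cum, zero_add]
      rw [cum_shift]
    rw [hsum]
    rw [PySem.List.pyRange_one_append 0 (min (max p 0 * 5) (min ((mins.length : Int)) (max p 0 * 5 + sum5 ps))) _ (by omega) (by omega)]
    rw [List.map_append, List.sum_append]
    -- first chunk: bucket pointer stays at 0
    have hfirst : ∀ pos ∈ PySem.List.pyRange 0 (min (max p 0 * 5) (min ((mins.length : Int)) (max p 0 * 5 + sum5 ps))) 1,
        costC (iBase + (advanceB (cum 0 (p :: ps)) pos 0 : Int)) (PySem.List.pyGetD mins pos "")
          = costC iBase (PySem.List.pyGetD mins pos "") := by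
      intro pos hpos
      rw [PySem.List.mem_pyRange_one] at hpos
      have hadv : advanceB (cum 0 (p :: ps)) pos 0 = 0 := by
        rw [hcum, advanceB_eq, if_pos (by simp), List.getD_cons_zero, if_neg (by omega)]
      rw [hadv]
      norm_num
    rw [List.map_congr_left hfirst]
    have htk := takeSum (costC iBase)
      ((min (max p 0 * 5) (min ((mins.length : Int)) (max p 0 * 5 + sum5 ps))).toNat) mins (by omega)
    have hcast : (((min (max p 0 * 5) (min ((mins.length : Int)) (max p 0 * 5 + sum5 ps))).toNat : Nat) : Int)
        = min (max p 0 * 5) (min ((mins.length : Int)) (max p 0 * 5 + sum5 ps)) := by omega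
    rw [hcast] at htk
    rw [htk]
    by_cases hB : max p 0 * 5 < min ((mins.length : Int)) (max p 0 * 5 + sum5 ps)
    · -- second chunk nonempty region: starts at the first boundary
      have hmin : min (max p 0 * 5) (min ((mins.length : Int)) (max p 0 * 5 + sum5 ps)) = max p 0 * 5 := by omega
      rw [hmin]
      have hc0L : max p 0 * 5 ≤ (mins.length : Int) := by omega
      -- shift the second chunk down by the first boundary
      rw [pyRange_one_shift (max p 0 * 5), List.map_map]
      have hsecond : ∀ q ∈ PySem.List.pyRange 0 (min ((mins.length : Int)) (max p 0 * 5 + sum5 ps) - max p 0 * 5) 1,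
          (((fun pos => costC (iBase + (advanceB (cum 0 (p :: ps)) pos 0 : Int)) (PySem.List.pyGetD mins pos "")) ∘ (· + max p 0 * 5)) q)
            = costC ((iBase + 1) + (advanceB (cum 0 ps) q 0 : Int)) (PySem.List.pyGetD (mins.drop (max p 0 * 5).toNat) q "") := by
        intro q hq
        rw [PySem.List.mem_pyRange_one] at hq
        obtain ⟨hq0, hq1⟩ := hq
        simp only [Function.comp_apply]
        have hadv : advanceB (cum 0 (p :: ps)) (q + max p 0 * 5) 0 = advanceB (cum 0 ps) q 0 + 1 := by
          rw [hcum, advanceB_eq, if_pos (by simp), List.getD_cons_zero, if_pos (by omega)]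
          rw [advanceB_cons ((cum 0 ps).map (· + max p 0 * 5)).length 0 _ _ _ (by omega)]
          rw [advanceB_map_add (cum 0 ps).length 0 _ _ _ (by omega)]
          have : q + max p 0 * 5 - max p 0 * 5 = q := by ring
          rw [this]
        rw [hadv]
        have hIdx : iBase + ((advanceB (cum 0 ps) q 0 + 1 : Nat) : Int) = (iBase + 1) + (advanceB (cum 0 ps) q 0 : Int) := by
          push_cast; ring
        rw [hIdx]
        have hc0cast : max p 0 * 5 = (((max p 0 * 5).toNat : Nat) : Int) := by omega
        have hdropped := pyGetD_drop mins (max p 0 * 5).toNat q hq0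
        rw [← hc0cast] at hdropped
        rw [hdropped]
      rw [List.map_congr_left hsecond]
      have hlen : min ((mins.length : Int)) (max p 0 * 5 + sum5 ps) - max p 0 * 5
          = min (((mins.drop (max p 0 * 5).toNat).length : Int)) (sum5 ps) := by
        rw [List.length_drop]
        omega
      rw [hlen, ih]
      -- match the spec
      simp only [specR]
      have hn : min (p * 5).toNat mins.length = (max p 0 * 5).toNat := by omega
      rw [hn]
    · -- second chunk empty: everything is mined by the first pick (or nothing remains)
      have hmin : min (max p 0 * 5) (min ((mins.length : Int)) (max p 0 * 5 + sum5 ps))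
          = min ((mins.length : Int)) (max p 0 * 5 + sum5 ps) := by omega
      rw [hmin, PySem.List.pyRange_one_eq_nil (by omega)]
      simp only [List.map_nil, List.sum_nil, add_zero]
      simp only [specR]
      have hn : min (p * 5).toNat mins.length = (min ((mins.length : Int)) (max p 0 * 5 + sum5 ps)).toNat := by omega
      rw [hn]
      have htail : specR (iBase + 1) ps (mins.drop ((min ((mins.length : Int)) (max p 0 * 5 + sum5 ps)).toNat)) = 0 := by
        by_cases hLe : (mins.length : Int) ≤ max p 0 * 5
        · rw [List.drop_eq_nil_of_le (by omega)]
          exact specR_nil ps (iBase + 1)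
        · exact specR_sum5_zero ps (iBase + 1) _ (by omega)
      rw [htail, add_zero]

lemma B_eq_spec (picks : List Int) (minerals : List String) :
    solution_alt picks minerals = specR 0 picks minerals := by
  show loopB (pvBoundsB picks).2 minerals
      (PySem.List.pyRange 0 (min ((minerals.length : Int)) (pvBoundsB picks).1) 1) 0 0
    = specR 0 picks minerals
  unfold pvBoundsB
  rw [bounds_spec picks 0 []]
  simp only [zero_add, List.nil_append]
  rw [loopB_eq (cum 0 picks) minerals
    (min ((minerals.length : Int)) (sum5 picks)).toNat 0 _ 0 0 (by omega)
    (fun k hk => absurd hk (Nat.not_lt_zero k))]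
  rw [zero_add, ← sumB picks minerals 0]
  congr 1
  apply List.map_congr_left
  intro pos _
  simp only [costB, costC, idx_eq, zero_add]

-- ===== VERDICT (by name: the statement is the Claim_ definition above) =====
theorem solution_spec : Claim_equal_solution := by
  intro picks minerals _ _
  unfold Spec_solution
  rw [A_eq_spec, B_eq_spec]
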